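-- pv_equiv track=rewrite | github.com/davidichalfyorov-wq/sct-theory | analysis/scripts/fund_combined_dr.py | molien_su2_coeff_bruteforce
-- ===== SOURCE A (Python) =====
-- def molien_su2_coeff_bruteforce(n: int) -> int:
--     """Coefficient of t^n in M(t) by brute-force enumeration.
--
--     M(t) = (1+t^6) / ((1-t^2)(1-t^3)(1-t^4))
--          = sum_{a>=0, b>=0, c>=0} t^{2a+3b+4c} + t^{2a+3b+4c+6}
--
--     So M(n) = #{(a,b,c): 2a+3b+4c = n} + #{(a,b,c): 2a+3b+4c = n-6}
--     """
--     count = 0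
--     # First term: 2a + 3b + 4c = n
--     for c in range(n // 4 + 1):
--         for b in range((n - 4 * c) // 3 + 1):
--             rem = n - 4 * c - 3 * b
--             if rem >= 0 and rem % 2 == 0:
--                 count += 1
--     # Second term: 2a + 3b + 4c = n - 6
--     if n >= 6:
--         n2 = n - 6
--         for c in range(n2 // 4 + 1):
--             for b in range((n2 - 4 * c) // 3 + 1):
--                 rem = n2 - 4 * c - 3 * b
--                 if rem >= 0 and rem % 2 == 0:
--                     count += 1
--     return count
-- ===== SOURCE B (Python) =====
-- def molien_su2_coeff_bruteforce(n: int) -> int: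
--     def count_rep(m: int) -> int:
--         # number of (a, b) with 2a + 3b = m - 4c, summed over c, counting the
--         # valid b for each c in closed form instead of scanning them.
--         total = 0
--         for c in range(m // 4 + 1):
--             r = m - 4 * c
--             k = r // 3
--             total += k // 2 + 1 if r % 2 == 0 else (k + 1) // 2
--         return total
--     return count_rep(n) + (count_rep(n - 6) if n >= 6 else 0)
-- ===== Notes on version B (the rewrite author's own statement) =====
-- stated objective: faster
-- what changed: The inner loop over b is replaced by a closed-form arithmetic-progression count of the valid b for each c, so B makes a single pass over c instead of A's nested double loop.
import Mathlib
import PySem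

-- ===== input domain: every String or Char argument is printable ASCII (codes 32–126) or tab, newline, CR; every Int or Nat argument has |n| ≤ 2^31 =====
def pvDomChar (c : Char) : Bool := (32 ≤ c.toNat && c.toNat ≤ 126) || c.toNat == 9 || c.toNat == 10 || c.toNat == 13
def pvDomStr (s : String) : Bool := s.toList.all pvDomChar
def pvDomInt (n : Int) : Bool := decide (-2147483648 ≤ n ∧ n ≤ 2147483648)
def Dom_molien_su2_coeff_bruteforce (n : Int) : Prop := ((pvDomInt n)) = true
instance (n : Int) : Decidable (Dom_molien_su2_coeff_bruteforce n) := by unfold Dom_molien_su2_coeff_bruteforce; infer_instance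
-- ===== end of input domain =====

-- B replaces A's inner loop over b by a closed-form count of the admissible b for each c
-- (objective: faster, O(n) instead of O(n^2); A and B agree on every input).

-- ===== PORT A =====
-- A's nested double loop, run once for n and (when n >= 6) once more for n - 6,
-- threading the single mutable `count` through both blocks exactly as the Python does.
def pvLoopA (m : Int) (count : Int) : Int :=
  (PySem.List.pyRange 0 (PySem.Int.floordiv m 4 + 1) 1).foldl
    (fun cnt c =>
      (PySem.List.pyRange 0 (PySem.Int.floordiv (m - 4 * c) 3 + 1) 1).foldl
        (fun cnt2 b =>
          let rem := m - 4 * c - 3 * b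
          if rem ≥ 0 ∧ PySem.Int.mod rem 2 = 0 then cnt2 + 1 else cnt2)
        cnt)
    count

def molien_su2_coeff_bruteforce (n : Int) : Int :=
  let count := pvLoopA n 0
  if n ≥ 6 then pvLoopA (n - 6) count else count

-- ===== PORT B =====
-- Source B's count_rep: single loop over c, closed-form count of valid b per iteration.
def pvCountRep (m : Int) : Int :=
  (PySem.List.pyRange 0 (PySem.Int.floordiv m 4 + 1) 1).foldl
    (fun total c =>
      let r := m - 4 * c
      let k := PySem.Int.floordiv r 3
      total + (if PySem.Int.mod r 2 = 0 then PySem.Int.floordiv k 2 + 1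
               else PySem.Int.floordiv (k + 1) 2))
    0

def molien_su2_coeff_bruteforce_alt (n : Int) : Int :=
  pvCountRep n + (if n ≥ 6 then pvCountRep (n - 6) else 0)

-- ===== PRECONDITION & SPEC =====
def Spec_molien_su2_coeff_bruteforce (n : Int) (out : Int) : Prop := out = molien_su2_coeff_bruteforce_alt n
instance (n : Int) (out : Int) : Decidable (Spec_molien_su2_coeff_bruteforce n out) := by unfold Spec_molien_su2_coeff_bruteforce; infer_instance

-- ===== CLAIM (what is proved, stated in full; the proofs are below) =====
def Claim_equal_molien_su2_coeff_bruteforce : Prop := ∀ (n : Int), Dom_molien_su2_coeff_bruteforce n → Spec_molien_su2_coeff_bruteforce n (molien_su2_coeff_bruteforce n)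

-- ===== LEMMAS AND PROOFS =====

-- Number of i in range(K+1) with i % 2 = e, in closed form.
lemma pv_parity_count (K e : Nat) (he : e < 2) :
    ((List.range (K + 1)).countP (fun i => i % 2 == e)) =
      (if e = 0 then K / 2 + 1 else (K + 1) / 2) := by
  induction K with
  | zero =>
      interval_cases e <;> decide
  | succ K ih =>
      rw [List.range_succ, List.countP_append, ih]
      simp only [List.countP_singleton, beq_iff_eq]
      split_ifs <;> omega

-- A's inner loop over b equals acc plus B's closed-form count, for r ≥ 0.
lemma pv_inner_eq (r acc : Int) (hr : 0 ≤ r) :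
    (PySem.List.pyRange 0 (PySem.Int.floordiv r 3 + 1) 1).foldl
      (fun cnt b =>
        if r - 3 * b ≥ 0 ∧ PySem.Int.mod (r - 3 * b) 2 = 0 then cnt + 1 else cnt) acc
    = acc + (if PySem.Int.mod r 2 = 0 then PySem.Int.floordiv (PySem.Int.floordiv r 3) 2 + 1
             else PySem.Int.floordiv (PySem.Int.floordiv r 3 + 1) 2) := by
  have h3 : PySem.Int.floordiv r 3 * 3 + PySem.Int.mod r 3 = r :=
    PySem.Int.floordiv_mul_add_mod r 3
  have hm3 : 0 ≤ PySem.Int.mod r 3 := PySem.Int.mod_nonneg r (by norm_num)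
  have hm3' : PySem.Int.mod r 3 < 3 := PySem.Int.mod_lt r (by norm_num)
  have hk0 : 0 ≤ PySem.Int.floordiv r 3 := by
    rw [PySem.Int.floordiv_eq_ediv_of_pos (by norm_num : (0:Int) < 3)]
    exact Int.ediv_nonneg hr (by norm_num)
  set k : Int := PySem.Int.floordiv r 3 with hk
  set K : Nat := k.toNat with hK
  have hkK : k = (K : Int) := by omega
  have h3' : 3 * k ≤ r ∧ r < 3 * k + 3 := by omega
  -- switch the Prop-ite step to the Bool form foldl_count_if expects
  rw [PySem.List.foldl_congr_mem _ _
      (fun cnt b => if (fun b : Int => decide (r - 3 * b ≥ 0 ∧ PySem.Int.mod (r - 3 * b) 2 = 0)) b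
                    = true then cnt + 1 else cnt) acc
      (by intro acc' b _; simp)]
  rw [PySem.List.foldl_count_if]
  rw [PySem.List.pyRange_one]
  rw [show ((k + 1 - 0).toNat) = K + 1 from by omega]
  rw [List.countP_map]
  set e : Nat := (PySem.Int.mod r 2).toNat with he
  have hm2 : PySem.Int.mod r 2 = r % 2 := PySem.Int.mod_eq_emod_of_pos (by norm_num)
  have he2 : (e : Int) = r % 2 := by
    have := Int.emod_two_eq r
    omega
  have hcongr : ∀ i ∈ List.range (K + 1),
      ((fun b : Int => decide (r - 3 * b ≥ 0 ∧ PySem.Int.mod (r - 3 * b) 2 = 0)) ∘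
        (fun i : Nat => (0 : Int) + (i : Int))) i = true ↔ (fun i : Nat => i % 2 == e) i = true := by
    intro i hi
    have hi' : i < K + 1 := List.mem_range.mp hi
    have hmod : PySem.Int.mod (r - 3 * ((0 : Int) + (i : Int))) 2 =
        (r - 3 * ((0 : Int) + (i : Int))) % 2 :=
      PySem.Int.mod_eq_emod_of_pos (by norm_num)
    simp only [Function.comp_apply, hmod, decide_eq_true_eq, beq_iff_eq]
    omega
  rw [List.countP_congr hcongr, pv_parity_count K e (by omega)]
  have hd1 : PySem.Int.floordiv k 2 = k / 2 := PySem.Int.floordiv_eq_ediv_of_pos (by norm_num)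
  have hd2 : PySem.Int.floordiv (k + 1) 2 = (k + 1) / 2 :=
    PySem.Int.floordiv_eq_ediv_of_pos (by norm_num)
  rw [hm2, hd1, hd2]
  split_ifs <;> omega

-- A's whole double-loop block equals count + B's count_rep.
lemma pv_loop_eq (m count : Int) : pvLoopA m count = count + pvCountRep m := by
  unfold pvLoopA pvCountRep
  have h4 : PySem.Int.floordiv m 4 * 4 + PySem.Int.mod m 4 = m :=
    PySem.Int.floordiv_mul_add_mod m 4
  have hm4 : 0 ≤ PySem.Int.mod m 4 := PySem.Int.mod_nonneg m (by norm_num)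
  have hstep : ∀ (acc : Int), ∀ c ∈ PySem.List.pyRange 0 (PySem.Int.floordiv m 4 + 1) 1,
      (PySem.List.pyRange 0 (PySem.Int.floordiv (m - 4 * c) 3 + 1) 1).foldl
        (fun cnt2 b =>
          let rem := m - 4 * c - 3 * b
          if rem ≥ 0 ∧ PySem.Int.mod rem 2 = 0 then cnt2 + 1 else cnt2) acc
      = acc + (if PySem.Int.mod (m - 4 * c) 2 = 0
               then PySem.Int.floordiv (PySem.Int.floordiv (m - 4 * c) 3) 2 + 1
               else PySem.Int.floordiv (PySem.Int.floordiv (m - 4 * c) 3 + 1) 2) := by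
    intro acc c hc
    obtain ⟨hc0, hc1⟩ := PySem.List.mem_pyRange_one.mp hc
    have hr : 0 ≤ m - 4 * c := by omega
    have := pv_inner_eq (m - 4 * c) acc hr
    simpa using this
  rw [PySem.List.foldl_congr_mem _ _
      (fun acc c => acc + (if PySem.Int.mod (m - 4 * c) 2 = 0
               then PySem.Int.floordiv (PySem.Int.floordiv (m - 4 * c) 3) 2 + 1
               else PySem.Int.floordiv (PySem.Int.floordiv (m - 4 * c) 3 + 1) 2)) count hstep]
  rw [PySem.List.foldl_add, PySem.List.foldl_add]
  ring

-- ===== VERDICT (by name: the statement is the Claim_ definition above) =====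
theorem molien_su2_coeff_bruteforce_spec : Claim_equal_molien_su2_coeff_bruteforce := by
  intro n _
  unfold Spec_molien_su2_coeff_bruteforce molien_su2_coeff_bruteforce molien_su2_coeff_bruteforce_alt
  by_cases h : n ≥ 6
  · simp only [if_pos h, pv_loop_eq]; ring
  · simp only [if_neg h, pv_loop_eq]; ring
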